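-- pv_equiv track=rewrite | github.com/Pratyush038/ai_health_planner | models/meal/meal_model.py | _adjust_meals_for_conditions
-- ===== SOURCE A (Python) =====
-- from typing import Dict, List
--
-- def _adjust_meals_for_conditions(meals: Dict, conditions: List[str]) -> Dict:
--     """Adjust meals based on health conditions"""
--     if "diabetes" in conditions:
--         meals = {k: v.replace("white rice", "brown rice")
--         .replace("sugar", "stevia")
--                  for k, v in meals.items()}
--     if "hypertension" in conditions:
--         meals = {k: v + " (low sodium)" for k, v in meals.items()}
--     if "heart disease" in conditions:
--         meals = {k: v.replace("ghee", "olive oil")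
--         .replace("full fat", "low fat")
--                  for k, v in meals.items()}
--     return meals
-- ===== SOURCE B (Python) =====
-- def _adjust_meals_for_conditions(meals, conditions):
--     """Adjust meals based on health conditions (single pass through a composed pipeline)"""
--     steps = []
--     if "diabetes" in conditions:
--         steps.append(lambda v: v.replace("white rice", "brown rice").replace("sugar", "stevia"))
--     if "hypertension" in conditions:
--         steps.append(lambda v: v + " (low sodium)")
--     if "heart disease" in conditions:
--         steps.append(lambda v: v.replace("ghee", "olive oil").replace("full fat", "low fat"))
--     out = {}
--     for k, v in meals.items():
--         for f in steps:
--             v = f(v)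
--         out[k] = v
--     return out
-- ===== Notes on version B (the rewrite author's own statement) =====
-- stated objective: alternative
-- what changed: B assembles the ordered list of per-condition transformation callables once, then makes a single pass over the meals threading each value through the composed pipeline, instead of A's up-to-three separate dict-comprehension passes.
import Mathlib
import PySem

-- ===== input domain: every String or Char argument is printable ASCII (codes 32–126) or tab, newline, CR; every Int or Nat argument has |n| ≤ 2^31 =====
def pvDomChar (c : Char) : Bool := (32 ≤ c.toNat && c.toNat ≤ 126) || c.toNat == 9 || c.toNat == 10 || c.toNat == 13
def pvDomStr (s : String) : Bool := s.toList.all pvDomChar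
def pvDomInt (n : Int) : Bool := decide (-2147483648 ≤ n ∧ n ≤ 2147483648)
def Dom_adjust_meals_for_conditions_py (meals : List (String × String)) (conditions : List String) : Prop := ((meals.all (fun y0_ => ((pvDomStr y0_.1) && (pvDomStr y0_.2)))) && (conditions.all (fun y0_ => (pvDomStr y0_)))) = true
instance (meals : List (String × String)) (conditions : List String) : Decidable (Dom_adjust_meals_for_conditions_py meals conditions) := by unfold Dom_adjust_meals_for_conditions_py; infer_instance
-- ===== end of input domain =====

-- B builds the ordered list of per-condition transformations once and applies them in a single
-- pass over the meals, instead of A's up-to-three separate mapping passes (objective: alternative).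

-- ===== PORT A =====
def adjust_meals_for_conditions_py (meals : List (String × String)) (conditions : List String) : List (String × String) :=
  let meals1 := if conditions.contains "diabetes"
    then meals.map (fun kv => (kv.1, PySem.Str.replace (PySem.Str.replace kv.2 "white rice" "brown rice") "sugar" "stevia"))
    else meals
  let meals2 := if conditions.contains "hypertension"
    then meals1.map (fun kv => (kv.1, kv.2 ++ " (low sodium)"))
    else meals1
  let meals3 := if conditions.contains "heart disease"
    then meals2.map (fun kv => (kv.1, PySem.Str.replace (PySem.Str.replace kv.2 "ghee" "olive oil") "full fat" "low fat"))
    else meals2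
  meals3

-- ===== PORT B =====
-- B-side helper: the pipeline of transformation steps collected from the conditions
def pvStepsB (conditions : List String) : List (String → String) :=
  (if conditions.contains "diabetes"
    then [fun v => PySem.Str.replace (PySem.Str.replace v "white rice" "brown rice") "sugar" "stevia"] else []) ++
  (if conditions.contains "hypertension"
    then [fun v => v ++ " (low sodium)"] else []) ++
  (if conditions.contains "heart disease"
    then [fun v => PySem.Str.replace (PySem.Str.replace v "ghee" "olive oil") "full fat" "low fat"] else [])

def adjust_meals_for_conditions_py_alt (meals : List (String × String)) (conditions : List String) : List (String × String) :=
  meals.map (fun kv => (kv.1, (pvStepsB conditions).foldl (fun v f => f v) kv.2))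

-- ===== PRECONDITION & SPEC =====
def Spec_adjust_meals_for_conditions_py (meals : List (String × String)) (conditions : List String) (out : List (String × String)) : Prop := out = adjust_meals_for_conditions_py_alt meals conditions
instance (meals : List (String × String)) (conditions : List String) (out : List (String × String)) : Decidable (Spec_adjust_meals_for_conditions_py meals conditions out) := by unfold Spec_adjust_meals_for_conditions_py; infer_instance

-- ===== CLAIM (what is proved, stated in full; the proofs are below) =====
def Claim_equal_adjust_meals_for_conditions_py : Prop := ∀ (meals : List (String × String)) (conditions : List String), Dom_adjust_meals_for_conditions_py meals conditions → Spec_adjust_meals_for_conditions_py meals conditions (adjust_meals_for_conditions_py meals conditions)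

-- ===== LEMMAS AND PROOFS =====

-- ===== VERDICT (by name: the statement is the Claim_ definition above) =====
theorem adjust_meals_for_conditions_py_spec : Claim_equal_adjust_meals_for_conditions_py := by
  intro meals conditions _
  unfold Spec_adjust_meals_for_conditions_py adjust_meals_for_conditions_py adjust_meals_for_conditions_py_alt pvStepsB
  by_cases h1 : "diabetes" ∈ conditions <;>
  by_cases h2 : "hypertension" ∈ conditions <;>
  by_cases h3 : "heart disease" ∈ conditions <;>
  simp [List.contains_eq_mem, h1, h2, h3, List.map_map, Function.comp]
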